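-- pv_equiv track=rewrite | github.com/jorzaiy/Threadloom | backend/narrator_input.py | _format_recent_window
-- ===== SOURCE A (Python) =====
-- def _format_recent_window(history: list[dict], limit_pairs: int = 6) -> str:
--     if not history:
--         return '暂无'
--     pairs = []
--     current_user = None
--     for item in history:
--         if not isinstance(item, dict):
--             continue
--         role = item.get('role')
--         if role == 'user':
--             current_user = item
--         elif role == 'assistant' and current_user is not None:
--             pairs.append((current_user, item))
--             current_user = None
--     pairs = pairs[-limit_pairs:]
--     if not pairs:
--         return '暂无'
--     lines = []
--     for user_item, assistant_item in pairs:
--         user_text = str(user_item.get('content', '') or '').strip()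
--         assistant_text = str(assistant_item.get('content', '') or '').strip()
--         if len(user_text) > 180:
--             user_text = user_text[:177] + '...'
--         if len(assistant_text) > 260:
--             assistant_text = assistant_text[:257] + '...'
--         lines.append(f"[用户] {user_text}")
--         lines.append(f"[叙事] {assistant_text}")
--     return '\n'.join(lines)
-- ===== SOURCE B (Python) =====
-- def _clip(text, cap):
--     t = str(text or '').strip()
--     return t[:cap - 3] + '...' if len(t) > cap else t
--
--
-- def _format_recent_window(history: list[dict], limit_pairs: int = 6) -> str:
--     if not history:
--         return '暂无'
--     seq = [item for item in history
--            if isinstance(item, dict) and item.get('role') in ('user', 'assistant')]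
--     qa = [(u, a) for u, a in zip(seq, seq[1:])
--           if u.get('role') == 'user' and a.get('role') == 'assistant'][-limit_pairs:]
--     if not qa:
--         return '暂无'
--     return '\n'.join(
--         "[用户] {}\n[叙事] {}".format(_clip(u.get('content', ''), 180),
--                                       _clip(a.get('content', ''), 260))
--         for u, a in qa)
-- ===== Notes on version B (the rewrite author's own statement) =====
-- stated objective: alternative
-- what changed: Replaces A's current_user state machine with a stateless pipeline: filter the history to role-bearing items, select the adjacent (user, assistant) pairs of that subsequence by zipping it with its own tail, tail-slice, and join one two-line block per pair.
import Mathlib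
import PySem

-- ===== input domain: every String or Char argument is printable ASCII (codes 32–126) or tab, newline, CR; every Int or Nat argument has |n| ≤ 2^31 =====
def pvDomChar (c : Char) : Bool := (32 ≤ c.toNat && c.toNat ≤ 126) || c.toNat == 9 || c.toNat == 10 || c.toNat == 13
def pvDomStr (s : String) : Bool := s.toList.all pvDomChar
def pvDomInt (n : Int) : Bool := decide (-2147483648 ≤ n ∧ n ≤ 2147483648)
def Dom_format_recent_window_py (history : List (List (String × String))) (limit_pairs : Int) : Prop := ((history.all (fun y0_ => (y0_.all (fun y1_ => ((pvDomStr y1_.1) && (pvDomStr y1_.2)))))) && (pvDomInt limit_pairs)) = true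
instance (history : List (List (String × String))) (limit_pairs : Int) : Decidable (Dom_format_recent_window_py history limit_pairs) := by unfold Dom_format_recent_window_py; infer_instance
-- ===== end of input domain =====

-- B drops A's current_user state machine entirely: it filters the history to role-bearing
-- items and selects the adjacent (user, assistant) pairs of that subsequence by zipping the
-- filtered list with its own tail, formatting each pair as a two-line block (objective:
-- alternative algorithm; same asymptotic cost).

-- ===== PORT A =====
-- one loop step of A's pairing loop; state = (pairs so far, current_user)
def pvStepA (s : List ((List (String × String)) × (List (String × String))) × Option (List (String × String)))
    (item : List (String × String)) :
    List ((List (String × String)) × (List (String × String))) × Option (List (String × String)) :=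
  let role := List.lookup "role" item
  if role = some "user" then (s.1, some item)
  else if role = some "assistant" then
    match s.2 with
    | some u => (s.1 ++ [(u, item)], none)   -- pairs.append((current_user, item)); current_user = None
    | none => s                               -- 'and current_user is not None' fails
  else s

-- A's per-pair formatting (body of the 'for user_item, assistant_item in pairs' loop);
-- str(d.get('content','') or '') is the identity on the str values admitted here, ported as getD.
def pvRenderA (p : (List (String × String)) × (List (String × String))) : List String :=
  let user_text := PySem.Str.strip ((List.lookup "content" p.1).getD "")
  let assistant_text := PySem.Str.strip ((List.lookup "content" p.2).getD "")
  let user_text := if 180 < PySem.Str.len user_text then PySem.Str.slice user_text none (some 177) ++ "..." else user_text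
  let assistant_text := if 260 < PySem.Str.len assistant_text then PySem.Str.slice assistant_text none (some 257) ++ "..." else assistant_text
  ["[用户] " ++ user_text, "[叙事] " ++ assistant_text]

def format_recent_window_py (history : List (List (String × String))) (limit_pairs : Int) : String :=
  if history = [] then "暂无"
  else
    let res := history.foldl pvStepA ([], none)
    let pairs := PySem.List.slice res.1 (some (-limit_pairs)) none     -- pairs[-limit_pairs:]
    if pairs = [] then "暂无"
    else PySem.Str.join "\n" (pairs.foldl (fun lines p => lines ++ pvRenderA p) [])

-- ===== PORT B =====
-- item.get('role') in ('user', 'assistant')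
def pvRel (item : List (String × String)) : Bool :=
  List.lookup "role" item == some "user" || List.lookup "role" item == some "assistant"

-- B's _clip helper: str(text or '').strip(), truncated to cap with '...' if longer than cap
def pvClip (text : Option String) (cap : Int) : String :=
  let t := PySem.Str.strip (text.getD "")
  if cap < PySem.Str.len t then PySem.Str.slice t none (some (cap - 3)) ++ "..." else t

def format_recent_window_py_alt (history : List (List (String × String))) (limit_pairs : Int) : String :=
  if history = [] then "暂无"
  else
    let seq := history.filter pvRel                                   -- role-bearing items
    let qa := PySem.List.slice                                        -- adjacent (user, assistant) pairs, tail-sliced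
      ((seq.zip (seq.drop 1)).filter (fun p =>
        List.lookup "role" p.1 == some "user" && List.lookup "role" p.2 == some "assistant"))
      (some (-limit_pairs)) none
    if qa = [] then "暂无"
    else PySem.Str.join "\n" (qa.map (fun p =>
      "[用户] " ++ pvClip (List.lookup "content" p.1) 180 ++ "\n[叙事] " ++ pvClip (List.lookup "content" p.2) 260))

-- ===== PRECONDITION & SPEC =====
def Spec_format_recent_window_py (history : List (List (String × String))) (limit_pairs : Int) (out : String) : Prop := out = format_recent_window_py_alt history limit_pairs
instance (history : List (List (String × String))) (limit_pairs : Int) (out : String) : Decidable (Spec_format_recent_window_py history limit_pairs out) := by unfold Spec_format_recent_window_py; infer_instance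

-- ===== CLAIM (what is proved, stated in full; the proofs are below) =====
def Claim_equal_format_recent_window_py : Prop := ∀ (history : List (List (String × String))) (limit_pairs : Int), Dom_format_recent_window_py history limit_pairs → Spec_format_recent_window_py history limit_pairs (format_recent_window_py history limit_pairs)

-- ===== LEMMAS AND PROOFS =====

-- the pairs A's forward machine produces, as a pure structural recursion
def pvF : List (List (String × String)) → Option (List (String × String)) →
    List ((List (String × String)) × (List (String × String)))
  | [], _ => []
  | x :: xs, cur =>
      if List.lookup "role" x = some "user" then pvF xs (some x)
      else if List.lookup "role" x = some "assistant" then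
        match cur with
        | some u => (u, x) :: pvF xs none
        | none => pvF xs cur
      else pvF xs cur

-- B's adjacent-pair selection as a function
def pvQ (s : List (List (String × String))) : List ((List (String × String)) × (List (String × String))) :=
  (s.zip (s.drop 1)).filter (fun p =>
    List.lookup "role" p.1 == some "user" && List.lookup "role" p.2 == some "assistant")

theorem pvStepA_acc (l : List (List (String × String)))
    (ps : List ((List (String × String)) × (List (String × String)))) (cur : Option (List (String × String))) :
    (l.foldl pvStepA (ps, cur)).1 = ps ++ pvF l cur := by
  induction l generalizing ps cur with
  | nil => simp [pvF]
  | cons x xs ih =>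
    simp only [List.foldl_cons, pvStepA, pvF]
    by_cases hu : List.lookup "role" x = some "user"
    · simp [hu, ih]
    · by_cases ha : List.lookup "role" x = some "assistant"
      · cases cur with
        | none => simp [ha, ih]
        | some u => simp [ha, ih]
      · simp [hu, ha, ih]

theorem pvQ_cons_cons (x y : List (String × String)) (t : List (List (String × String))) :
    pvQ (x :: y :: t) =
      (if List.lookup "role" x = some "user" ∧ List.lookup "role" y = some "assistant"
       then [(x, y)] else []) ++ pvQ (y :: t) := by
  simp only [pvQ, List.zip, List.drop, List.zipWith, List.filter_cons]
  by_cases h1 : List.lookup "role" x = some "user" <;>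
    by_cases h2 : List.lookup "role" y = some "assistant" <;>
      simp [h1, h2]

theorem pvQ_cons_not_user (x : List (String × String)) (s : List (List (String × String)))
    (hx : ¬ List.lookup "role" x = some "user") : pvQ (x :: s) = pvQ s := by
  cases s with
  | nil => simp [pvQ]
  | cons y t => rw [pvQ_cons_cons]; simp [hx]

-- A's pairs are exactly the adjacent (user, assistant) pairs of the filtered history
theorem pvF_eq_pvQ (l : List (List (String × String))) :
    pvF l none = pvQ (l.filter pvRel) ∧
    ∀ u, List.lookup "role" u = some "user" → pvF l (some u) = pvQ (u :: l.filter pvRel) := by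
  induction l with
  | nil =>
    refine ⟨by simp [pvF, pvQ], fun u _ => by simp [pvF, pvQ]⟩
  | cons x xs ih =>
    by_cases hu : List.lookup "role" x = some "user"
    · have hrel : pvRel x = true := by simp [pvRel, hu]
      constructor
      · simp only [pvF, hu, if_true, List.filter_cons_of_pos hrel]
        exact ih.2 x hu
      · intro u hru
        simp only [pvF, hu, if_true, List.filter_cons_of_pos hrel]
        rw [ih.2 x hu, pvQ_cons_cons]
        simp [hu]
    · by_cases ha : List.lookup "role" x = some "assistant"
      · have hrel : pvRel x = true := by simp [pvRel, ha]
        constructor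
        · rw [show pvF (x :: xs) none = pvF xs none from by simp [pvF, ha]]
          rw [List.filter_cons_of_pos hrel, ih.1, pvQ_cons_not_user x _ hu]
        · intro u hru
          rw [show pvF (x :: xs) (some u) = (u, x) :: pvF xs none from by simp [pvF, ha]]
          rw [List.filter_cons_of_pos hrel, pvQ_cons_cons, if_pos ⟨hru, ha⟩,
            pvQ_cons_not_user x _ hu, ih.1]
          simp
      · have hrel : pvRel x = false := by simp [pvRel, hu, ha]
        constructor
        · rw [show pvF (x :: xs) none = pvF xs none from by simp [pvF, hu, ha]]
          rw [List.filter_cons_of_neg (by simp [hrel])]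
          exact ih.1
        · intro u hru
          rw [show pvF (x :: xs) (some u) = pvF xs (some u) from by simp [pvF, hu, ha]]
          rw [List.filter_cons_of_neg (by simp [hrel])]
          exact ih.2 u hru

-- A's per-pair formatting agrees with B's _clip helper
theorem pvRenderA_eq (p : (List (String × String)) × (List (String × String))) :
    pvRenderA p = ["[用户] " ++ pvClip (List.lookup "content" p.1) 180,
                   "[叙事] " ++ pvClip (List.lookup "content" p.2) 260] := by
  simp only [pvRenderA, pvClip]
  norm_num

-- joining a flat [f p, g p, f q, g q, …] list with sep equals joining the per-pair blocks f p ++ sep ++ g p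
theorem pvCharsJoin {α : Type} (sep : List Char) (f g : α → List Char) (l : List α) :
    PySem.Chars.join sep (l.flatMap fun p => [f p, g p]) =
      PySem.Chars.join sep (l.map fun p => f p ++ sep ++ g p) := by
  induction l with
  | nil => rfl
  | cons p t ih =>
    cases t with
    | nil =>
      simp [PySem.Chars.join_cons_cons, PySem.Chars.join_singleton]
    | cons q t' =>
      simp only [List.flatMap_cons, List.map_cons, List.cons_append, List.nil_append] at ih ⊢
      conv_rhs => rw [PySem.Chars.join_cons_cons]
      rw [PySem.Chars.join_cons_cons, PySem.Chars.join_cons_cons, ih]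
      simp [List.append_assoc]

-- joining A's flat two-lines-per-pair list equals joining B's one-block-per-pair list
theorem pvJoin_blocks (l : List ((List (String × String)) × (List (String × String)))) :
    PySem.Str.join "\n" (l.foldl (fun lines p => lines ++ pvRenderA p) []) =
    PySem.Str.join "\n" (l.map (fun p =>
      "[用户] " ++ pvClip (List.lookup "content" p.1) 180 ++ "\n[叙事] " ++ pvClip (List.lookup "content" p.2) 260)) := by
  apply String.toList_injective
  rw [PySem.List.foldl_append_eq_flatMap, List.nil_append]
  rw [PySem.Str.toList_join, PySem.Str.toList_join, List.map_flatMap, List.map_map]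
  have hA : ∀ p : (List (String × String)) × (List (String × String)),
      (pvRenderA p).map String.toList =
        [("[用户] " ++ pvClip (List.lookup "content" p.1) 180).toList,
         ("[叙事] " ++ pvClip (List.lookup "content" p.2) 260).toList] := by
    intro p
    rw [pvRenderA_eq]
    rfl
  simp only [hA, Function.comp_def]
  rw [pvCharsJoin "\n".toList
      (fun p => ("[用户] " ++ pvClip (List.lookup "content" p.1) 180).toList)
      (fun p => ("[叙事] " ++ pvClip (List.lookup "content" p.2) 260).toList) l]
  have hmap : List.map (fun p : (List (String × String)) × (List (String × String)) =>
        ("[用户] " ++ pvClip (List.lookup "content" p.1) 180).toList ++ "\n".toList ++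
          ("[叙事] " ++ pvClip (List.lookup "content" p.2) 260).toList) l =
      List.map (fun p : (List (String × String)) × (List (String × String)) =>
        ("[用户] " ++ pvClip (List.lookup "content" p.1) 180 ++ "\n[叙事] " ++
          pvClip (List.lookup "content" p.2) 260).toList) l := by
    apply List.map_congr_left
    intro p _
    simp only [String.toList_append]
    rw [show ("\n[叙事] " : String).toList = '\n' :: ("[叙事] " : String).toList from rfl]
    simp
  rw [hmap]

-- ===== VERDICT (by name: the statement is the Claim_ definition above) =====
theorem format_recent_window_py_spec : Claim_equal_format_recent_window_py := by
  intro history limit _hdom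
  unfold Spec_format_recent_window_py
  unfold format_recent_window_py format_recent_window_py_alt
  by_cases hh : history = []
  · simp [hh]
  · have hA := pvStepA_acc history [] none
    simp only [List.nil_append] at hA
    simp only [if_neg hh]
    rw [hA, (pvF_eq_pvQ history).1]
    rw [pvJoin_blocks]
    rfl
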